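-- pv_equiv track=rewrite | github.com/engineeringmath/cnn_ood | dk_seg.py | shapes_match
-- ===== SOURCE A (Python) =====
-- def shapes_match(shapes_list):
--     '''Checks if shapes in the provided list are all the same'''
--
--     match= True
--
--     n_shapes= len(shapes_list)
--
--     for i in range(n_shapes):
--         for j in range(1,n_shapes):
--
--             shape_1= shapes_list[i]
--             shape_2= shapes_list[j]
--
--             if not shape_1==0 and not shape_2==0:
--                 if not shape_1==shape_2:
--                     match= False
--
--     return match
-- ===== SOURCE B (Python) =====
-- def shapes_match(shapes_list):
--     '''Checks if shapes in the provided list are all the same'''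
--     vals = {s for s in shapes_list if s != 0}
--     return len(vals) <= 1
-- ===== Notes on version B (the rewrite author's own statement) =====
-- stated objective: simpler
-- what changed: Replaces the quadratic nested pairwise index loop with a single-pass set comprehension over the non-zero elements followed by a cardinality test len(vals) <= 1.
import Mathlib
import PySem

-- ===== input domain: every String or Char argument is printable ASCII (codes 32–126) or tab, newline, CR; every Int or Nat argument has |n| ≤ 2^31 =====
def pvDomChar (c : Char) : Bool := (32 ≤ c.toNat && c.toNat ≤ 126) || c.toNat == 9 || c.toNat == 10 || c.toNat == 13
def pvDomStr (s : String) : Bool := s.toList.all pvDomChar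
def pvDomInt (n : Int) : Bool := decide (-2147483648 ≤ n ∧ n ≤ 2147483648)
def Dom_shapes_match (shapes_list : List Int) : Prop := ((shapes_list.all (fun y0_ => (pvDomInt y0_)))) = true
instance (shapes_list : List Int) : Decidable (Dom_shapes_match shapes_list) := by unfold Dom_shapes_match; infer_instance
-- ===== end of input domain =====

-- B replaces A's quadratic nested pairwise index loop by one pass: the set of
-- non-zero elements, then a cardinality test (simpler and asymptotically faster).

-- ===== PORT A =====
-- literal transliteration of A: nested index loops over range(n) × range(1, n),
-- a Bool flag set to false whenever two non-zero entries differ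
def shapes_match (shapes_list : List Int) : Bool :=
  let match0 : Bool := true
  let n_shapes : Int := (shapes_list.length : Int)
  (PySem.List.pyRange 0 n_shapes 1).foldl (fun m i =>
    (PySem.List.pyRange 1 n_shapes 1).foldl (fun m j =>
      let shape_1 := PySem.List.pyGetD shapes_list i 0
      let shape_2 := PySem.List.pyGetD shapes_list j 0
      if ¬shape_1 = 0 ∧ ¬shape_2 = 0 then
        if ¬shape_1 = shape_2 then false else m
      else m) m) match0

-- ===== PORT B =====
-- literal transliteration of B: vals = {s for s in shapes_list if s != 0}; len(vals) <= 1
def shapes_match_alt (shapes_list : List Int) : Bool :=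
  let vals : PySem.Set Int := PySem.Set.ofList (shapes_list.filter (fun s => s != 0))
  decide (vals.length ≤ 1)

-- ===== PRECONDITION & SPEC =====
def Spec_shapes_match (shapes_list : List Int) (out : Bool) : Prop := out = shapes_match_alt shapes_list
instance (shapes_list : List Int) (out : Bool) : Decidable (Spec_shapes_match shapes_list out) := by unfold Spec_shapes_match; infer_instance

-- ===== CLAIM (what is proved, stated in full; the proofs are below) =====
def Claim_equal_shapes_match : Prop := ∀ (shapes_list : List Int), Dom_shapes_match shapes_list → Spec_shapes_match shapes_list (shapes_match shapes_list)

-- ===== LEMMAS AND PROOFS =====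

-- "all non-zero elements of xs are equal" — the property both programs decide
def allEqNZ (xs : List Int) : Prop :=
  ∀ a ∈ xs, ∀ b ∈ xs, a ≠ 0 → b ≠ 0 → a = b

-- A's inner-loop test as a Bool, for index pair (i, j)
def badPair (xs : List Int) (i j : Int) : Bool :=
  decide (¬ PySem.List.pyGetD xs i 0 = 0 ∧ ¬ PySem.List.pyGetD xs j 0 = 0 ∧
          ¬ PySem.List.pyGetD xs i 0 = PySem.List.pyGetD xs j 0)

lemma foldl_if_false {α : Type} (c : α → Bool) (xs : List α) (m : Bool) :
    xs.foldl (fun m x => if c x then false else m) m = (m && xs.all (fun x => !c x)) := by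
  induction xs generalizing m with
  | nil => simp
  | cons x t ih =>
    simp only [List.foldl_cons, List.all_cons, ih]
    cases c x <;> cases m <;> simp

lemma shapes_match_eq_all (xs : List Int) :
    shapes_match xs =
      (PySem.List.pyRange 0 (xs.length : Int) 1).all (fun i =>
        (PySem.List.pyRange 1 (xs.length : Int) 1).all (fun j => !badPair xs i j)) := by
  unfold shapes_match
  have hinner : ∀ (m : Bool) (i : Int),
      (PySem.List.pyRange 1 (xs.length : Int) 1).foldl (fun m j =>
        let shape_1 := PySem.List.pyGetD xs i 0
        let shape_2 := PySem.List.pyGetD xs j 0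
        if ¬shape_1 = 0 ∧ ¬shape_2 = 0 then
          if ¬shape_1 = shape_2 then false else m
        else m) m
      = (m && (PySem.List.pyRange 1 (xs.length : Int) 1).all (fun j => !badPair xs i j)) := by
    intro m i
    have hstep : (fun (m : Bool) (j : Int) =>
        let shape_1 := PySem.List.pyGetD xs i 0
        let shape_2 := PySem.List.pyGetD xs j 0
        if ¬shape_1 = 0 ∧ ¬shape_2 = 0 then
          if ¬shape_1 = shape_2 then false else m
        else m)
        = (fun (m : Bool) (j : Int) => if badPair xs i j then false else m) := by
      funext m j
      simp only [badPair]
      split_ifs with h1 h2 h3 h3 <;> simp_all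
    rw [hstep, foldl_if_false]
  have houter : (fun (m : Bool) (i : Int) =>
      (PySem.List.pyRange 1 (xs.length : Int) 1).foldl (fun m j =>
        let shape_1 := PySem.List.pyGetD xs i 0
        let shape_2 := PySem.List.pyGetD xs j 0
        if ¬shape_1 = 0 ∧ ¬shape_2 = 0 then
          if ¬shape_1 = shape_2 then false else m
        else m) m)
      = (fun (m : Bool) (i : Int) => if (!(PySem.List.pyRange 1 (xs.length : Int) 1).all
            (fun j => !badPair xs i j)) then false else m) := by
    funext m i
    rw [hinner m i]
    cases h : (PySem.List.pyRange 1 (xs.length : Int) 1).all (fun j => !badPair xs i j) <;> simp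
  simp only
  rw [houter, foldl_if_false]
  simp

lemma shapes_match_iff (xs : List Int) : shapes_match xs = true ↔ allEqNZ xs := by
  rw [shapes_match_eq_all]
  simp only [List.all_eq_true, PySem.List.mem_pyRange_one, Bool.not_eq_eq_eq_not, Bool.not_true,
    badPair, decide_eq_false_iff_not]
  constructor
  · intro h a ha b hb ha0 hb0
    by_contra hab
    obtain ⟨ia, hia, rfl⟩ := List.mem_iff_getElem.mp ha
    obtain ⟨ib, hib, rfl⟩ := List.mem_iff_getElem.mp hb
    have hga : PySem.List.pyGetD xs (ia : Int) 0 = xs[ia] := by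
      rw [PySem.List.pyGetD_natCast]; exact List.getD_eq_getElem _ _ hia
    have hgb : PySem.List.pyGetD xs (ib : Int) 0 = xs[ib] := by
      rw [PySem.List.pyGetD_natCast]; exact List.getD_eq_getElem _ _ hib
    rcases Nat.eq_zero_or_pos ib with hb0' | hb1
    · -- ib = 0, so ia ≥ 1 (the two values differ, hence ia ≠ ib)
      have hane : ia ≠ ib := by rintro rfl; exact hab rfl
      have hia1 : 1 ≤ (ia : Int) := by omega
      have := h (ib : Int) ⟨by omega, by exact_mod_cast hib⟩ (ia : Int)
        ⟨hia1, by exact_mod_cast hia⟩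
      rw [hga, hgb] at this
      exact this ⟨hb0, ha0, fun e => hab e.symm⟩
    · have := h (ia : Int) ⟨by omega, by exact_mod_cast hia⟩ (ib : Int)
        ⟨by omega, by exact_mod_cast hib⟩
      rw [hga, hgb] at this
      exact this ⟨ha0, hb0, hab⟩
  · intro h i ⟨hi0, hin⟩ j ⟨hj1, hjn⟩ ⟨hne1, hne2, hne⟩
    have hgi : PySem.List.pyGetD xs i 0 = xs[i.toNat] :=
      PySem.List.pyGetD_eq_getElem xs 0 hi0 hin
    have hgj : PySem.List.pyGetD xs j 0 = xs[j.toNat] :=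
      PySem.List.pyGetD_eq_getElem xs 0 (by omega) hjn
    rw [hgi] at hne1 hne
    rw [hgj] at hne2 hne
    exact hne (h _ (List.getElem_mem _) _ (List.getElem_mem _) hne1 hne2)

lemma length_le_one_of_pairwise_eq {l : List Int} (hnd : l.Nodup)
    (h : ∀ a ∈ l, ∀ b ∈ l, a = b) : l.length ≤ 1 := by
  match l with
  | [] => simp
  | [x] => simp
  | x :: y :: t =>
    exfalso
    have hxy : x ≠ y := by
      intro e; exact (List.nodup_cons.mp hnd).1 (e ▸ List.mem_cons_self)
    exact hxy (h x List.mem_cons_self y (List.mem_cons_of_mem _ List.mem_cons_self))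

lemma shapes_match_alt_iff (xs : List Int) : shapes_match_alt xs = true ↔ allEqNZ xs := by
  unfold shapes_match_alt
  simp only [decide_eq_true_eq]
  set l := xs.filter (fun s => s != 0) with hl
  have hmem : ∀ a, a ∈ l ↔ a ∈ xs ∧ a ≠ 0 := by
    intro a; simp [hl, List.mem_filter]
  constructor
  · intro h a ha b hb ha0 hb0
    have ha' : a ∈ PySem.Set.ofList l := (PySem.Set.mem_ofList l a).mpr ((hmem a).mpr ⟨ha, ha0⟩)
    have hb' : b ∈ PySem.Set.ofList l := (PySem.Set.mem_ofList l b).mpr ((hmem b).mpr ⟨hb, hb0⟩)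
    match hs : PySem.Set.ofList l with
    | [] => rw [hs] at ha'; exact absurd ha' (List.not_mem_nil)
    | [x] =>
      rw [hs] at ha' hb'
      simp only [List.mem_singleton] at ha' hb'
      rw [ha', hb']
    | x :: y :: t =>
      exfalso
      have := h
      rw [hs] at this
      simp at this
  · intro h
    apply length_le_one_of_pairwise_eq (PySem.Set.nodup_ofList l)
    intro a ha b hb
    have ha' := (hmem a).mp ((PySem.Set.mem_ofList l a).mp ha)
    have hb' := (hmem b).mp ((PySem.Set.mem_ofList l b).mp hb)
    exact h a ha'.1 b hb'.1 ha'.2 hb'.2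

-- ===== VERDICT (by name: the statement is the Claim_ definition above) =====
theorem shapes_match_spec : Claim_equal_shapes_match := by
  intro xs _
  unfold Spec_shapes_match
  rw [Bool.eq_iff_iff, shapes_match_iff, shapes_match_alt_iff]
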